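-- pv_equiv track=rewrite | github.com/kwaper/iti0102-2018 | kt1/exam.py | sum_half_evens
-- ===== SOURCE A (Python) =====
-- def sum_half_evens(nums: list) -> int:
--     """
--     Return the sum of first half of even ints in the given array.
--     If there are odd number of even numbers, then include the middle number.
--
--     sum_half_evens([2, 1, 2, 3, 4]) => 4
--     sum_half_evens([2, 2, 0, 4]) => 4
--     sum_half_evens([1, 3, 5, 8]) => 8
--     sum_half_evens([2, 3, 5, 7, 8, 9, 10, 11]) => 10
--     """
--     evens = []
--     for i in nums:
--         if i % 2 == 0:
--             evens.append(i)
--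
--     if len(evens) % 2 == 0:
--         return sum(evens[:int(len(evens) / 2)])
--     elif len(evens) % 2 != 0:
--         return sum(evens[:int((len(evens) // 2) + 1)])
--     elif len(evens) <= 0:
--         return 0
-- ===== SOURCE B (Python) =====
-- def sum_half_evens(nums: list) -> int:
--     """Count evens first, then re-scan summing evens with an early stop
--     once the ceiling half has been taken (no evens list is built)."""
--     n = 0
--     for x in nums:
--         if x % 2 == 0:
--             n += 1
--     target = (n + 1) // 2
--     total = 0
--     seen = 0
--     for x in nums:
--         if seen >= target:
--             break
--         if x % 2 == 0:
--             total += x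
--             seen += 1
--     return total
-- ===== Notes on version B (the rewrite author's own statement) =====
-- stated objective: alternative
-- what changed: Instead of materializing the list of evens and slicing its first (ceiling) half, B counts the evens in one pass, computes the ceiling half, then re-scans with a running sum and early break once that many evens have been added.
import Mathlib
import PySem

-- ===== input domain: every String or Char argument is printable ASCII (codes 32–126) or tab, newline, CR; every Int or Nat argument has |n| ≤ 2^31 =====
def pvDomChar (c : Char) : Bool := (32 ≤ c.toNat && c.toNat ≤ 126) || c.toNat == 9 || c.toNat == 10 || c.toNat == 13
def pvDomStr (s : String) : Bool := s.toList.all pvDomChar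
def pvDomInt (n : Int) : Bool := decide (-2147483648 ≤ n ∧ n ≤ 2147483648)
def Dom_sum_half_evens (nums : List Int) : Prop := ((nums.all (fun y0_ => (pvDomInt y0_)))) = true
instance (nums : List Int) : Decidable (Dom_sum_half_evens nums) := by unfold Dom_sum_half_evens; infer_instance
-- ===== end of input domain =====

-- B re-implements A by counting the evens and re-scanning with an early stop,
-- instead of building the evens list and slicing it; same O(n) cost, O(1) space.

-- ===== PORT A =====
-- evens[:k] with k = len(evens)/2 resp. len(evens)//2 + 1 is a nonnegative in-range
-- slice, so List.take k is exact here.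
def sum_half_evens (nums : List Int) : Int :=
  let evens := nums.foldl (fun acc i => if PySem.Int.mod i 2 = 0 then acc ++ [i] else acc) []
  if evens.length % 2 = 0 then
    (evens.take (evens.length / 2)).sum
  else
    (evens.take (evens.length / 2 + 1)).sum

-- ===== PORT B =====
-- second loop of Source B: early break once `seen` reaches `target`
def sumLoopB : List Int → Int → Int → Int → Int
  | [], _, _, total => total
  | x :: xs, target, seen, total =>
    if seen ≥ target then total
    else if PySem.Int.mod x 2 = 0 then sumLoopB xs target (seen + 1) (total + x)
    else sumLoopB xs target seen total

def sum_half_evens_alt (nums : List Int) : Int :=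
  let n := nums.foldl (fun n x => if PySem.Int.mod x 2 = 0 then n + 1 else n) (0 : Int)
  let target := PySem.Int.floordiv (n + 1) 2
  sumLoopB nums target 0 0

-- ===== PRECONDITION & SPEC =====
def Spec_sum_half_evens (nums : List Int) (out : Int) : Prop := out = sum_half_evens_alt nums
instance (nums : List Int) (out : Int) : Decidable (Spec_sum_half_evens nums out) := by unfold Spec_sum_half_evens; infer_instance

-- ===== CLAIM (what is proved, stated in full; the proofs are below) =====
def Claim_equal_sum_half_evens : Prop := ∀ (nums : List Int), Dom_sum_half_evens nums → Spec_sum_half_evens nums (sum_half_evens nums)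

-- ===== LEMMAS AND PROOFS =====

def pvEven (x : Int) : Bool := PySem.Int.mod x 2 = 0

lemma sumLoopB_eq (xs : List Int) : ∀ (target seen total : Int),
    sumLoopB xs target seen total
      = total + ((xs.filter pvEven).take (target - seen).toNat).sum := by
  induction xs with
  | nil => intro target seen total; simp [sumLoopB]
  | cons x xs ih =>
    intro target seen total
    simp only [sumLoopB]
    by_cases hge : seen ≥ target
    · have h0 : (target - seen).toNat = 0 := by omega
      simp [hge, h0]
    · rw [if_neg hge]
      have h1 : (target - seen).toNat = (target - (seen + 1)).toNat + 1 := by omega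
      by_cases hev : PySem.Int.mod x 2 = 0
      · rw [if_pos hev, ih, List.filter_cons]
        simp only [pvEven, hev, decide_true, if_pos, h1, List.take_succ_cons, List.sum_cons]
        ring
      · rw [if_neg hev, ih, List.filter_cons]
        rw [PySem.Int.mod_eq_zero_iff_dvd] at hev
        simp [pvEven, hev]

lemma ceil_half_eq (n : Nat) :
    (PySem.Int.floordiv ((n : Int) + 1) 2).toNat = (n + 1) / 2 := by
  have h : PySem.Int.floordiv ((n : Int) + 1) 2 = (((n + 1) / 2 : Nat) : Int) := by
    have h2 := PySem.Int.floordiv_natCast (n + 1) 2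
    rw [← h2]
    push_cast
    ring_nf
  rw [h]; exact Int.toNat_natCast _

theorem sum_half_evens_spec : Claim_equal_sum_half_evens := by
  intro nums _
  unfold Spec_sum_half_evens sum_half_evens sum_half_evens_alt
  simp only [PySem.List.foldl_append_ite_eq_filter, PySem.List.foldl_ite_add_one,
    List.nil_append, Int.zero_add, sumLoopB_eq, Int.sub_zero]
  set evens := nums.filter (fun i => decide (PySem.Int.mod i 2 = 0)) with hev
  have hfe : nums.filter pvEven = evens := by
    rw [hev]
    exact List.filter_congr (fun x _ => by simp [pvEven])
  have hcount : nums.countP (fun i => decide (PySem.Int.mod i 2 = 0)) = evens.length := by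
    simp [hev, List.countP_eq_length_filter]
  rw [hfe, hcount, ceil_half_eq]
  by_cases hpar : evens.length % 2 = 0
  · have : evens.length / 2 = (evens.length + 1) / 2 := by omega
    simp [hpar, this]
  · have : evens.length / 2 + 1 = (evens.length + 1) / 2 := by omega
    simp [hpar, this]
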